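-- pv_equiv track=rewrite | github.com/karlnyr/fishing_cryptons | Scripts/04_handling_blast_out.py | compress_accession_nrs
-- ===== SOURCE A (Python) =====
-- def compress_accession_nrs(accession_nr_list):
--     '''Compress genomes hit of accession numbers, return a list of
--     genomes that had more than 4 hits'''
--     temp_dict = {}
--     counter = 0
--     for acn in accession_nr_list:
--         if acn in temp_dict:
--             temp_dict[acn] += 1
--         else:
--             temp_dict[acn] = 1
--     acn_list = []
--     for acn in temp_dict:
--         acn_list.append(f"{acn}\n")
--     return acn_list
-- ===== SOURCE B (Python) =====
-- def compress_accession_nrs(accession_nr_list):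
--     '''Compress genomes hit of accession numbers, return a list of
--     genomes that had more than 4 hits'''
--     out = []
--     rest = list(accession_nr_list)
--     while rest:
--         head = rest[0]
--         out.append(f"{head}\n")
--         rest = [x for x in rest[1:] if x != head]
--     return out
-- ===== Notes on version B (the rewrite author's own statement) =====
-- stated objective: alternative
-- what changed: Replaced A's hashed count-dict build plus key-iteration with a filter-based extraction loop: repeatedly emit the first remaining element and delete all its later occurrences from the rest, so no dict/set/hash structure exists at all.
import Mathlib
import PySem

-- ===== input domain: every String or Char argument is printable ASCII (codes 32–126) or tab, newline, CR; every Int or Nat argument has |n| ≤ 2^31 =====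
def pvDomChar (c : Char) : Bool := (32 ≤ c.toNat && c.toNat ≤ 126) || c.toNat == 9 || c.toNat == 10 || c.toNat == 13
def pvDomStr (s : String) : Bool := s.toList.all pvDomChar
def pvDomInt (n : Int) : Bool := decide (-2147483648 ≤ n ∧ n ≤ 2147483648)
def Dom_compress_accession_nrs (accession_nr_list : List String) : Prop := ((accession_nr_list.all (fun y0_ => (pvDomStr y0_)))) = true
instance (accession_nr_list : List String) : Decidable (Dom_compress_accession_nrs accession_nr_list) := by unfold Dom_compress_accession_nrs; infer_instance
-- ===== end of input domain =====

-- B is a hash-free alternative (not faster: O(n*d) vs A's O(n)): instead of A's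
-- count-dict build plus key-iteration, it repeatedly emits the first remaining element
-- and filters its later occurrences out of the rest. Equal return value on the whole domain.

-- ===== PORT A =====
-- A: build a count dict over the list, then iterate its keys appending "<acn>\n".
def compress_accession_nrs (accession_nr_list : List String) : List String :=
  let temp_dict : PySem.Dict String Int :=
    accession_nr_list.foldl
      (fun d acn =>
        if d.contains acn then d.insert acn (d.getD acn 0 + 1)
        else d.insert acn 1)
      PySem.Dict.empty
  temp_dict.keys.foldl (fun acn_list acn => acn_list ++ [acn ++ "\n"]) []

-- ===== PORT B =====
-- B's while loop: emit head ++ "\n", filter head out of the tail, repeat.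
def pvAltLoop : List String → List String
  | [] => []
  | head :: rest =>
      (head ++ "\n") :: pvAltLoop (rest.filter (fun x => x != head))
termination_by l => l.length
decreasing_by
  simpa using Nat.lt_succ_of_le (List.length_filter_le _ rest)

def compress_accession_nrs_alt (accession_nr_list : List String) : List String :=
  pvAltLoop accession_nr_list

-- ===== PRECONDITION & SPEC =====
def Spec_compress_accession_nrs (accession_nr_list : List String) (out : List String) : Prop := out = compress_accession_nrs_alt accession_nr_list
instance (accession_nr_list : List String) (out : List String) : Decidable (Spec_compress_accession_nrs accession_nr_list out) := by unfold Spec_compress_accession_nrs; infer_instance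

-- ===== CLAIM =====
def Claim_equal_compress_accession_nrs : Prop := ∀ (accession_nr_list : List String), Dom_compress_accession_nrs accession_nr_list → Spec_compress_accession_nrs accession_nr_list (compress_accession_nrs accession_nr_list)

-- ===== LEMMAS AND PROOFS =====

-- proof-only helper: pvAltLoop without the "\n" suffix
def pvDedup : List String → List String
  | [] => []
  | head :: rest => head :: pvDedup (rest.filter (fun x => x != head))
termination_by l => l.length
decreasing_by
  simpa using Nat.lt_succ_of_le (List.length_filter_le _ rest)

theorem pv_altLoop_eq_map (l : List String) :
    pvAltLoop l = (pvDedup l).map (· ++ "\n") := by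
  induction l using pvDedup.induct with
  | case1 => simp [pvAltLoop, pvDedup]
  | case2 head rest ih =>
    simp only [List.unattach_filter] at ih
    rw [pvAltLoop, pvDedup, List.map_cons]
    congr 1
    simpa using ih

-- filter-based dedup computes Set.update: generalization over an already-seen prefix s.
theorem pv_update_eq_dedup_filter (t : List String) (s : PySem.Set String) :
    PySem.Set.update s t = s ++ pvDedup (t.filter (fun x => !(s.contains x))) := by
  induction t generalizing s with
  | nil => simp [PySem.Set.update, pvDedup]
  | cons h t ih =>
    by_cases hmem : h ∈ s
    · have hc : s.contains h = true := by
        simpa [PySem.Set.contains_iff] using hmem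
      rw [PySem.Set.update_cons, PySem.Set.add_of_mem hmem, ih s]
      congr 2
      simp [hmem]
    · have hc : s.contains h = false := by
        simpa [PySem.Set.contains_iff] using hmem
      rw [PySem.Set.update_cons, PySem.Set.add_of_not_mem hmem, ih (s ++ [h])]
      have hfilt : t.filter (fun x => !((s ++ [h]).contains x))
          = (t.filter (fun x => !(s.contains x))).filter (fun x => x != h) := by
        rw [List.filter_filter]
        apply List.filter_congr
        intro x _
        by_cases hx : x = h <;> by_cases hxs : x ∈ s <;>
          simp [hx, hxs, bne]
      rw [hfilt]
      rw [List.append_assoc]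
      congr 1
      rw [List.filter_cons_of_pos (by simp [hmem]), pvDedup, List.singleton_append]

theorem pv_dedup_eq_ofList (l : List String) :
    pvDedup l = PySem.Set.ofList l := by
  have h := pv_update_eq_dedup_filter l PySem.Set.empty
  simp [PySem.Set.empty, PySem.Set.contains] at h
  rw [PySem.Set.ofList_eq_foldl]
  exact h.symm

-- Appending one element at a time is mapping.
theorem pv_foldl_append_map (l : List String) (acc : List String) :
    l.foldl (fun acn_list acn => acn_list ++ [acn ++ "\n"]) acc = acc ++ l.map (· ++ "\n") := by
  induction l generalizing acc with
  | nil => simp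
  | cons x xs ih => simp [List.foldl, ih]

-- A's count loop always inserts at the current key, so its keys are Set.ofList of the list.
theorem pv_A_keys (l : List String) :
    (l.foldl
      (fun (d : PySem.Dict String Int) acn =>
        if d.contains acn then d.insert acn (d.getD acn 0 + 1)
        else d.insert acn 1)
      PySem.Dict.empty).keys = PySem.Set.ofList l := by
  have h : ∀ (d : PySem.Dict String Int) (acn : String),
      (if d.contains acn then d.insert acn (d.getD acn 0 + 1) else d.insert acn 1)
        = d.insert acn (if d.contains acn then d.getD acn 0 + 1 else 1) := by
    intro d acn; split_ifs <;> rfl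
  calc (l.foldl
      (fun (d : PySem.Dict String Int) acn =>
        if d.contains acn then d.insert acn (d.getD acn 0 + 1)
        else d.insert acn 1)
      PySem.Dict.empty).keys
      = (l.foldl
          (fun (d : PySem.Dict String Int) acn =>
            d.insert acn (if d.contains acn then d.getD acn 0 + 1 else 1))
          PySem.Dict.empty).keys := by
        congr 1
        exact PySem.List.foldl_congr_mem l _ _ _ (fun d acn _ => h d acn)
    _ = PySem.Set.update PySem.Dict.empty.keys l := by
        exact PySem.Dict.keys_foldl_insert l _ PySem.Dict.empty
    _ = PySem.Set.ofList l := by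
        rw [PySem.Dict.keys_empty, PySem.Set.update_nil_left]

-- ===== VERDICT =====
theorem compress_accession_nrs_spec : Claim_equal_compress_accession_nrs := by
  intro l _
  show compress_accession_nrs l = compress_accession_nrs_alt l
  unfold compress_accession_nrs compress_accession_nrs_alt
  rw [pv_altLoop_eq_map, pv_dedup_eq_ofList]
  dsimp only
  rw [pv_A_keys, pv_foldl_append_map, List.nil_append]
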